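-- pv_equiv track=rewrite | github.com/bala9066/AI_S2S_V2 | tools/mermaid_salvage.py | _step_trim
-- ===== SOURCE A (Python) =====
-- from typing import Optional
--
-- def _step_trim(text: str) -> tuple[str, Optional[str]]:
--     """Step final — strip trailing whitespace on each line + collapse 3+
--     blank lines to 1. Keeps output tidy."""
--     lines = [ln.rstrip() for ln in text.split("\n")]
--     out: list[str] = []
--     blank = 0
--     for ln in lines:
--         if not ln:
--             blank += 1
--             if blank <= 1:
--                 out.append(ln)
--         else:
--             blank = 0
--             out.append(ln)
--     return ("\n".join(out).strip() + "\n", None)  # never report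
-- ===== SOURCE B (Python) =====
-- def _step_trim(text: str) -> tuple:
--     """Run-length decomposition: emit each maximal run of lines at once --
--     one "" for a blank run, the whole slice for a non-blank run."""
--     lines = [ln.rstrip() for ln in text.split("\n")]
--     out = []
--     i, n = 0, len(lines)
--     while i < n:
--         if lines[i] == "":
--             out.append("")
--             while i < n and lines[i] == "":
--                 i += 1
--         else:
--             j = i
--             while j < n and lines[j] != "":
--                 j += 1
--             out.extend(lines[i:j])
--             i = j
--     return ("\n".join(out).strip() + "\n", None)
-- ===== Notes on version B (the rewrite author's own statement) =====
-- stated objective: alternative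
-- what changed: Replaced the stateful blank-counter loop with run-length grouping: an index scan that emits each maximal run at once (a single "" for a blank run, the whole slice for a non-blank run), so no per-line counter state is maintained.
import Mathlib
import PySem

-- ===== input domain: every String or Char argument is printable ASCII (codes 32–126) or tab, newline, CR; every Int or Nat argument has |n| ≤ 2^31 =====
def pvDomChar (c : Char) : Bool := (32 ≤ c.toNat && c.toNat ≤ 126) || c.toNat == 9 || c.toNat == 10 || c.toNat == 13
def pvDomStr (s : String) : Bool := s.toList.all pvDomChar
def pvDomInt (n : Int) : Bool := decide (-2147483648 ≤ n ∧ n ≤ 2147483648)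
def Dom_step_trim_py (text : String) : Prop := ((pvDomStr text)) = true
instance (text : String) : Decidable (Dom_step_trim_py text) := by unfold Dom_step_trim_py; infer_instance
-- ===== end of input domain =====

-- B replaces A's stateful blank-counter loop by a run-length scan that emits each maximal
-- run of lines at once (one "" per blank run); same output, alternative decomposition.

-- ===== PORT A =====
-- A's for-loop over lines, state (out, blank); 'if not ln' = the line is empty
def pvStepA (st : List (List Char) × Nat) (ln : List Char) : List (List Char) × Nat :=
  if ln == [] then
    let blank := st.2 + 1
    (if blank ≤ 1 then st.1 ++ [ln] else st.1, blank)
  else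
    (st.1 ++ [ln], 0)

def step_trim_py (text : String) : String × Option String :=
  let lines := (PySem.Chars.splitOn text.toList "\n".toList).map PySem.Chars.rstrip
  let st := lines.foldl pvStepA ([], 0)
  (String.ofList (PySem.Chars.strip (PySem.Chars.join "\n".toList st.1) ++ "\n".toList), none)

-- ===== PORT B =====
-- the outer 'while i < n' loop of Source B: each step consumes one maximal run
-- (blank run → one "", non-blank run → the whole run), exactly as the Python index scan does
def pvRuns : List (List Char) → List (List Char)
  | [] => []
  | ln :: rest =>
    if ln == [] then
      [] :: pvRuns (rest.dropWhile (fun l => l == []))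
    else
      (ln :: rest.takeWhile (fun l => !(l == []))) ++ pvRuns (rest.dropWhile (fun l => !(l == [])))
termination_by l => l.length
decreasing_by
  · exact Nat.lt_succ_of_le (List.length_dropWhile_le _ _)
  · exact Nat.lt_succ_of_le (List.length_dropWhile_le _ _)

def step_trim_py_alt (text : String) : String × Option String :=
  let lines := (PySem.Chars.splitOn text.toList "\n".toList).map PySem.Chars.rstrip
  let out := pvRuns lines
  (String.ofList (PySem.Chars.strip (PySem.Chars.join "\n".toList out) ++ "\n".toList), none)

-- ===== PRECONDITION & SPEC =====
def Spec_step_trim_py (text : String) (out : String × Option String) : Prop := out = step_trim_py_alt text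
instance (text : String) (out : String × Option String) : Decidable (Spec_step_trim_py text out) := by unfold Spec_step_trim_py; infer_instance

-- ===== CLAIM (what is proved, stated in full; the proofs are below) =====
def Claim_equal_step_trim_py : Prop := ∀ (text : String), Dom_step_trim_py text → Spec_step_trim_py text (step_trim_py text)

-- ===== LEMMAS AND PROOFS =====

-- a non-blank run can be peeled off line by line
lemma pvRuns_take_drop (l : List (List Char)) :
    pvRuns l = l.takeWhile (fun s => !(s == [])) ++ pvRuns (l.dropWhile (fun s => !(s == []))) := by
  cases l with
  | nil => simp [pvRuns]
  | cons ln rest =>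
    by_cases h : ln == ([] : List Char)
    · have he : ln = [] := by simpa using h
      subst he
      simp
    · simp only [pvRuns, h, List.takeWhile_cons, List.dropWhile_cons]
      simp

lemma pvRuns_cons_nonblank (ln : List Char) (rest : List (List Char)) (h : (ln == ([] : List Char)) = false) :
    pvRuns (ln :: rest) = ln :: pvRuns rest := by
  rw [pvRuns]
  simp only [h, if_neg Bool.false_ne_true]
  rw [pvRuns_take_drop rest]
  simp

-- the loop invariant: A's accumulator equals the emitted runs so far; a positive blank
-- counter means we are inside a blank run whose remainder is still to be skipped
lemma pvFold_inv (lines : List (List Char)) : ∀ (out : List (List Char)) (b : Nat),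
    (lines.foldl pvStepA (out, b)).1 =
      out ++ (if b = 0 then pvRuns lines else pvRuns (lines.dropWhile (fun l => l == []))) := by
  induction lines with
  | nil => intro out b; simp [pvRuns]
  | cons ln rest ih =>
    intro out b
    by_cases h : ln == ([] : List Char)
    · have he : ln = [] := by simpa using h
      subst he
      rcases Nat.eq_zero_or_pos b with hb | hb
      · subst hb
        simp only [List.foldl_cons, pvStepA, if_pos h]
        rw [ih]
        simp [pvRuns]
      · have hb1 : ¬ (b + 1 ≤ 1) := by omega
        have hb0 : b ≠ 0 := by omega
        simp only [List.foldl_cons, pvStepA, if_pos h]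
        rw [ih]
        simp [hb1, hb0]
    · have h' : (ln == ([] : List Char)) = false := by simpa using h
      simp only [List.foldl_cons, pvStepA, h', if_neg Bool.false_ne_true]
      rw [ih]
      rw [List.dropWhile_cons]
      simp only [h', if_neg Bool.false_ne_true]
      rw [pvRuns_cons_nonblank ln rest h']
      by_cases hb : b = 0 <;> simp [hb]

lemma pvFold_eq_runs (lines : List (List Char)) :
    (lines.foldl pvStepA ([], 0)).1 = pvRuns lines := by
  simpa using pvFold_inv lines [] 0

-- ===== VERDICT (by name: the statement is the Claim_ definition above) =====
theorem step_trim_py_spec : Claim_equal_step_trim_py := by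
  intro text _
  unfold Spec_step_trim_py
  simp only [step_trim_py, step_trim_py_alt, pvFold_eq_runs]
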